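-- pv_equiv track=rewrite | github.com/conan1014/EC-Tors | Code/3-Tors/3_torsion.py | valid_points_slow_2
-- ===== SOURCE A (Python) =====
-- def valid_points_slow_2(a,b,x,p):
--     y_2 = (x**3 + a*x + b)%p
--     QRS = [x**2%p for x in range(p)]
--     if y_2%p==0:
--         return 1
--     elif y_2 in QRS:
--         return 2
--     else:
--         return 0
-- ===== SOURCE B (Python) =====
-- def valid_points_slow_2(a, b, x, p):
--     # Two-pointer merge: instead of squaring every residue mod p and testing
--     # membership, walk the arithmetic progression y_2, y_2+p, ... up to (p//2)**2
--     # and test each member for being a perfect integer square, advancing the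
--     # integer-sqrt pointer s monotonically (squares and progression are both sorted).
--     y_2 = (x**3 + a*x + b) % p
--     if y_2 == 0:
--         return 1
--     s = 0
--     for v in range(y_2, (p // 2) ** 2 + 1, p):
--         while s * s < v:
--             s += 1
--         if s * s == v:
--             return 2
--     return 0
-- ===== Notes on version B (the rewrite author's own statement) =====
-- stated objective: faster
-- what changed: A squares every residue 0..p-1, materialises the list and tests membership; B instead merges two sorted sequences with two pointers: it walks the arithmetic progression y_2, y_2+p, ... up to (p//2)^2 and tests each member for being a perfect integer square, advancing a monotone integer-sqrt pointer.
import Mathlib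
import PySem

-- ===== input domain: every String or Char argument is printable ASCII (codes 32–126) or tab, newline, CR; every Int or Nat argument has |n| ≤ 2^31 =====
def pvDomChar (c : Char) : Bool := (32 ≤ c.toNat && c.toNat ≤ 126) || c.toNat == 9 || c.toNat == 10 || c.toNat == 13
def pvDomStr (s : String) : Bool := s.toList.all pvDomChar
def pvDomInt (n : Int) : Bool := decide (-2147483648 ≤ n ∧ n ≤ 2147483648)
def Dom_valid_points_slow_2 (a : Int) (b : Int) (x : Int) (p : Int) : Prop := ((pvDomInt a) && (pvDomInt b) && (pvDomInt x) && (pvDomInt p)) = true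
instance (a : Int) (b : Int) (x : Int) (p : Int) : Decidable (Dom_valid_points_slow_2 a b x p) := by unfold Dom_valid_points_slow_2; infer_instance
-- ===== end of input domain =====

-- B replaces A's "square every residue mod p, materialise the list, test membership" with a
-- two-pointer merge: it walks the progression y_2, y_2+p, … up to (p//2)² and tests each
-- member for being a perfect integer square with a monotone integer-sqrt pointer.

-- ===== PORT A =====
def valid_points_slow_2 (a : Int) (b : Int) (x : Int) (p : Int) : Int :=
  let y_2 := PySem.Int.mod (x ^ 3 + a * x + b) p
  let QRS := (PySem.List.pyRange 0 p 1).map (fun t => PySem.Int.mod (t ^ 2) p)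
  if PySem.Int.mod y_2 p = 0 then 1
  else if y_2 ∈ QRS then 2
  else 0

-- ===== PORT B =====
-- inner 'while s * s < v: s += 1' of Source B; fuel bounds the number of condition checks
def vpsGrowF : Nat → Int → Int → Int
  | 0, _, s => s
  | n + 1, v, s => if s * s < v then vpsGrowF n v (s + 1) else s

def vpsGrow (v s : Int) : Int := vpsGrowF ((v - s).toNat + 1) v s

-- the 'for v in range(…)' loop of Source B, carrying the pointer s
def vpsLoop : List Int → Int → Int
  | [], _ => 0
  | v :: rest, s =>
      let s' := vpsGrow v s
      if s' * s' = v then 2 else vpsLoop rest s'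

def valid_points_slow_2_alt (a : Int) (b : Int) (x : Int) (p : Int) : Int :=
  let y_2 := PySem.Int.mod (x ^ 3 + a * x + b) p
  if y_2 = 0 then 1
  else vpsLoop (PySem.List.pyRange y_2 ((PySem.Int.floordiv p 2) ^ 2 + 1) p) 0

-- ===== PRECONDITION & SPEC =====
-- p = 0 makes '% p' raise ZeroDivisionError in both Pythons; nothing else is excluded.
def Pre_valid_points_slow_2 (a : Int) (b : Int) (x : Int) (p : Int) : Prop := p ≠ 0
instance (a : Int) (b : Int) (x : Int) (p : Int) : Decidable (Pre_valid_points_slow_2 a b x p) := by unfold Pre_valid_points_slow_2; infer_instance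

def pvWitness_valid_points_slow_2 : Int × Int × Int × Int := (1, 1, 2, 7)

def Spec_valid_points_slow_2 (a : Int) (b : Int) (x : Int) (p : Int) (out : Int) : Prop := out = valid_points_slow_2_alt a b x p
instance (a : Int) (b : Int) (x : Int) (p : Int) (out : Int) : Decidable (Spec_valid_points_slow_2 a b x p out) := by unfold Spec_valid_points_slow_2; infer_instance

-- ===== CLAIM (what is proved, stated in full; the proofs are below) =====
def Claim_equal_valid_points_slow_2 : Prop := ∀ (a : Int) (b : Int) (x : Int) (p : Int), Dom_valid_points_slow_2 a b x p → Pre_valid_points_slow_2 a b x p → Spec_valid_points_slow_2 a b x p (valid_points_slow_2 a b x p)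

-- ===== LEMMAS AND PROOFS =====

-- the grown pointer is ≥ its start, its square reaches v, and it skipped no square ≥ v
theorem vpsGrowF_spec (n : Nat) : ∀ (v s : Int), 0 ≤ s → 1 ≤ v → (v - s).toNat < n →
    s ≤ vpsGrowF n v s ∧ v ≤ vpsGrowF n v s * vpsGrowF n v s ∧
      ∀ m, s ≤ m → m < vpsGrowF n v s → m * m < v := by
  induction n with
  | zero => intro v s _ _ h; omega
  | succ n ih =>
    intro v s hs hv hf
    rw [vpsGrowF]
    by_cases hlt : s * s < v
    · rw [if_pos hlt]
      have hsv : s < v := by nlinarith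
      obtain ⟨h1, h2, h3⟩ := ih v (s + 1) (by omega) hv (by omega)
      refine ⟨by omega, h2, ?_⟩
      intro m hm1 hm2
      rcases eq_or_lt_of_le hm1 with h | h
      · rwa [← h]
      · exact h3 m (by omega) hm2
    · rw [if_neg hlt]
      exact ⟨le_refl s, by omega, fun m h1 h2 => by omega⟩

theorem vpsGrow_spec (v s : Int) (hs : 0 ≤ s) (hv : 1 ≤ v) :
    s ≤ vpsGrow v s ∧ v ≤ vpsGrow v s * vpsGrow v s ∧
      ∀ m, s ≤ m → m < vpsGrow v s → m * m < v :=
  vpsGrowF_spec _ v s hs hv (by omega)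

-- the merge loop returns 2 iff some member of the (sorted, ≥ 1) list is a perfect square,
-- given that no square below the pointer can still occur in the list
theorem vpsLoop_spec (L : List Int) : ∀ s : Int, 0 ≤ s →
    (∀ u ∈ L, 1 ≤ u) → L.Pairwise (· < ·) →
    (∀ m, 0 ≤ m → m < s → ∀ u ∈ L, m * m < u) →
    ((∃ u ∈ L, ∃ m, 0 ≤ m ∧ m * m = u) → vpsLoop L s = 2) ∧
      (¬ (∃ u ∈ L, ∃ m, 0 ≤ m ∧ m * m = u) → vpsLoop L s = 0) := by
  induction L with
  | nil => intro s _ _ _ _; simp [vpsLoop]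
  | cons v rest ih =>
    intro s hs h1 hpair hinv
    have hv1 : 1 ≤ v := h1 v (by simp)
    obtain ⟨hg1, hg2, hg3⟩ := vpsGrow_spec v s hs hv1
    set s' := vpsGrow v s with hs'
    -- every m < s' has m*m < v
    have hlow : ∀ m, 0 ≤ m → m < s' → m * m < v := by
      intro m hm0 hms'
      by_cases hms : m < s
      · exact hinv m hm0 hms v (by simp)
      · exact hg3 m (by omega) hms'
    by_cases heq : s' * s' = v
    · constructor
      · intro _; rw [vpsLoop]; simp only [← hs', if_pos heq]
      · intro hno
        exact absurd ⟨v, by simp, s', by omega, heq⟩ hno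
    · have hnosq : ¬ ∃ m, 0 ≤ m ∧ m * m = v := by
        rintro ⟨m, hm0, hmv⟩
        by_cases hms' : m < s'
        · exact absurd hmv (by have := hlow m hm0 hms'; omega)
        · have : s' * s' ≤ m * m := by nlinarith [hg1, hs]
          exact heq (by omega)
      have hstep : vpsLoop (v :: rest) s = vpsLoop rest s' := by
        rw [vpsLoop]; simp only [← hs', if_neg heq]
      obtain ⟨ih1, ih2⟩ := ih s' (by omega) (fun u hu => h1 u (by simp [hu]))
        (List.Pairwise.of_cons hpair)
        (fun m hm0 hms' u hu => lt_trans (hlow m hm0 hms')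
          (List.rel_of_pairwise_cons hpair hu))
      constructor
      · rintro ⟨u, hu, m, hm0, hmu⟩
        rcases List.mem_cons.mp hu with rfl | hu'
        · exact absurd ⟨m, hm0, hmu⟩ hnosq
        · rw [hstep]; exact ih1 ⟨u, hu', m, hm0, hmu⟩
      · intro hno
        rw [hstep]
        exact ih2 (fun ⟨u, hu, hsq⟩ => hno ⟨u, by simp [hu], hsq⟩)

-- squares mod p are symmetric: (p - t)² ≡ t²  (p > 0)
theorem sq_mod_symm (p t : Int) (hp : 0 < p) :
    PySem.Int.mod ((p - t) * (p - t)) p = PySem.Int.mod (t * t) p := by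
  rw [PySem.Int.mod_eq_emod_of_pos hp, PySem.Int.mod_eq_emod_of_pos hp,
    Int.emod_eq_emod_iff_emod_sub_eq_zero]
  have h : (p - t) * (p - t) - t * t = p * (p - 2 * t) := by ring
  rw [h, Int.mul_emod_right]

-- a range with negative step and start ≤ stop is empty
theorem pyRange_neg_step_nil (a b s : Int) (hs : s < 0) (hab : a ≤ b) :
    PySem.List.pyRange a b s = [] := by
  rw [PySem.List.pyRange]
  rw [if_neg (by omega)]
  have h1 : ¬ (0 < s) := by omega
  have h2 : ¬ (b < a) := by omega
  simp [h1, h2]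

-- sortedness of a positive-step range
theorem pyRange_pos_pairwise (a b s : Int) (hs : 0 < s) :
    (PySem.List.pyRange a b s).Pairwise (· < ·) := by
  rw [PySem.List.pyRange_of_pos a b hs]
  refine List.Pairwise.map _ (fun i j h => ?_) (List.pairwise_lt_range)
  have : (i : Int) < (j : Int) := by exact_mod_cast h
  nlinarith

theorem valid_points_slow_2_spec : Claim_equal_valid_points_slow_2 := by
  intro a b x p _ hp
  unfold Spec_valid_points_slow_2 valid_points_slow_2 valid_points_slow_2_alt
  set y2 := PySem.Int.mod (x ^ 3 + a * x + b) p with hy2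
  have hzero : PySem.Int.mod y2 p = 0 ↔ y2 = 0 := by
    rw [PySem.Int.mod_eq_zero_iff_dvd]
    constructor
    · intro hd
      rcases lt_or_gt_of_ne hp with hneg | hpos
      · have hb : p < y2 ∧ y2 ≤ 0 := by rw [hy2]; exact PySem.Int.mod_neg_bounds _ hneg
        exact Int.eq_zero_of_abs_lt_dvd ((Int.neg_dvd).mpr hd) (by rw [abs_lt]; omega)
      · have hb : 0 ≤ y2 ∧ y2 < p := by
          rw [hy2]; exact ⟨PySem.Int.mod_nonneg _ hpos, PySem.Int.mod_lt _ hpos⟩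
        exact Int.eq_zero_of_abs_lt_dvd hd (by rw [abs_lt]; omega)
    · intro h; rw [h]; exact dvd_zero p
  by_cases hy0 : y2 = 0
  · rw [if_pos (hzero.mpr hy0), if_pos hy0]
  · rw [if_neg (by rw [hzero]; exact hy0), if_neg hy0]
    set h2 := PySem.Int.floordiv p 2 with hh2
    rcases lt_or_gt_of_ne hp with hneg | hpos
    · -- p < 0: A's residue list is empty, B's progression is empty
      have hyb : p < y2 ∧ y2 ≤ 0 := by rw [hy2]; exact PySem.Int.mod_neg_bounds _ hneg
      rw [PySem.List.pyRange_one_eq_nil (by omega)]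
      rw [pyRange_neg_step_nil _ _ _ hneg (by nlinarith [sq_nonneg h2])]
      simp [vpsLoop]
    · -- p > 0
      have hyb : 0 ≤ y2 ∧ y2 < p := by
        rw [hy2]; exact ⟨PySem.Int.mod_nonneg _ hpos, PySem.Int.mod_lt _ hpos⟩
      have hy1 : 1 ≤ y2 := by omega
      have hhb : h2 * 2 ≤ p ∧ p < (h2 + 1) * 2 := by
        rw [hh2]; exact (PySem.Int.floordiv_eq_iff_of_pos (by norm_num)).mp rfl
      obtain ⟨hL2, hL0⟩ := vpsLoop_spec (PySem.List.pyRange y2 (h2 ^ 2 + 1) p) 0 le_rfl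
        (fun u hu => by
          have := (PySem.List.mem_pyRange_iff_of_pos hpos u).mp hu; omega)
        (pyRange_pos_pairwise _ _ _ hpos) (fun m hm0 hms => by omega)
      have hmodc : ∀ w : Int, p ∣ w - y2 → w % p = y2 := by
        intro w hd
        have h := Int.emod_eq_emod_iff_emod_sub_eq_zero.mpr (Int.emod_eq_zero_of_dvd hd)
        rwa [Int.emod_eq_of_lt (a := y2) (b := p) (by omega) (by omega)] at h
      have hbridge : (∃ u ∈ PySem.List.pyRange y2 (h2 ^ 2 + 1) p, ∃ m, 0 ≤ m ∧ m * m = u) ↔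
          y2 ∈ (PySem.List.pyRange 0 p 1).map (fun t => PySem.Int.mod (t ^ 2) p) := by
        constructor
        · -- a perfect square in the progression gives a residue whose square hits y2
          rintro ⟨u, hu, m, hm0, hmu⟩
          obtain ⟨hu1, hu2, hdvd⟩ := (PySem.List.mem_pyRange_iff_of_pos hpos u).mp hu
          refine List.mem_map.mpr ⟨PySem.Int.mod m p, ?_, ?_⟩
          · exact PySem.List.mem_pyRange_one.mpr
              ⟨PySem.Int.mod_nonneg _ hpos, PySem.Int.mod_lt _ hpos⟩
          · rw [pow_two, PySem.Int.mod_eq_emod_of_pos hpos, PySem.Int.mod_eq_emod_of_pos hpos,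
              ← Int.mul_emod, hmu]
            exact hmodc u hdvd
        · -- a residue whose square hits y2 gives a perfect square in the progression
          intro hmem
          obtain ⟨t, ht, hts⟩ := List.mem_map.mp hmem
          obtain ⟨ht0, htp⟩ := PySem.List.mem_pyRange_one.mp ht
          -- fold t into the half range [0, h2] using symmetry
          have key : ∀ m : Int, 0 ≤ m → m ≤ h2 → PySem.Int.mod (m * m) p = y2 →
              ∃ u ∈ PySem.List.pyRange y2 (h2 ^ 2 + 1) p, ∃ m' : Int, 0 ≤ m' ∧ m' * m' = u := by
            intro m hm0 hmh hmod
            refine ⟨m * m, ?_, m, hm0, rfl⟩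
            rw [PySem.Int.mod_eq_emod_of_pos hpos] at hmod
            have hdvd : p ∣ m * m - y2 := by
              refine Int.dvd_of_emod_eq_zero (Int.emod_eq_emod_iff_emod_sub_eq_zero.mp ?_)
              rw [hmod, Int.emod_eq_of_lt (by omega) (by omega)]
            refine (PySem.List.mem_pyRange_iff_of_pos hpos _).mpr ⟨?_, ?_, hdvd⟩
            · -- y2 ≤ m*m : their difference is a multiple of p and > -p
              obtain ⟨k, hk⟩ := hdvd
              have hk0 : 0 ≤ k := by
                by_contra hneg
                have : k ≤ -1 := by omega
                nlinarith [sq_nonneg m]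
              nlinarith
            · rw [pow_two]; nlinarith
          by_cases hth : t ≤ h2
          · exact key t ht0 hth (by rw [← pow_two]; exact hts)
          · refine key (p - t) (by omega) (by omega) ?_
            rw [sq_mod_symm p t hpos, ← pow_two]; exact hts
      by_cases hq : ∃ u ∈ PySem.List.pyRange y2 (h2 ^ 2 + 1) p, ∃ m, 0 ≤ m ∧ m * m = u
      · rw [hL2 hq, if_pos (hbridge.mp hq)]
      · rw [hL0 hq, if_neg (fun hmem => hq (hbridge.mpr hmem))]
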